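-- pv_equiv track=rewrite | github.com/JiH00nKw0n/extract_agent | utils.py | split_transcript_into_n
-- ===== SOURCE A (Python) =====
-- from typing import Any, Dict, List, Set
--
-- def split_transcript_into_n(text: str, n: int) -> List[str]:
--     if n < 2:
--         if n == 1:
--             return [text]
--         else:
--             raise ValueError("The number of parts (n) must be 1 or greater.")
--
--     sections = text.split("\n")
--     total_length = len(sections)
--     split_size = total_length // n
--
--     parts = [sections[i * split_size:(i + 1) * split_size] for i in range(n)]
--     remaining_sections = sections[n * split_size:]
--     if remaining_sections:
--         parts[-1].extend(remaining_sections)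
--
--     return ["\n".join(part) for part in parts]
-- ===== SOURCE B (Python) =====
-- from typing import List
--
-- def split_transcript_into_n(text: str, n: int) -> List[str]:
--     if n < 2:
--         if n == 1:
--             return [text]
--         else:
--             raise ValueError("The number of parts (n) must be 1 or greater.")
--     sections = text.split("\n")
--     split_size = len(sections) // n
--     parts = []
--     for _ in range(n - 1):
--         parts.append("\n".join(sections[:split_size]))
--         sections = sections[split_size:]
--     parts.append("\n".join(sections))
--     return parts
-- ===== Notes on version B (the rewrite author's own statement) =====
-- stated objective: simpler
-- what changed: Replaces A's range-indexed slicing comprehension plus a mutate-the-last-part remainder patch by a single destructive loop that peels split_size lines off the front n-1 times and gives the entire rest to the last part, so no remainder step exists.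
import Mathlib
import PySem

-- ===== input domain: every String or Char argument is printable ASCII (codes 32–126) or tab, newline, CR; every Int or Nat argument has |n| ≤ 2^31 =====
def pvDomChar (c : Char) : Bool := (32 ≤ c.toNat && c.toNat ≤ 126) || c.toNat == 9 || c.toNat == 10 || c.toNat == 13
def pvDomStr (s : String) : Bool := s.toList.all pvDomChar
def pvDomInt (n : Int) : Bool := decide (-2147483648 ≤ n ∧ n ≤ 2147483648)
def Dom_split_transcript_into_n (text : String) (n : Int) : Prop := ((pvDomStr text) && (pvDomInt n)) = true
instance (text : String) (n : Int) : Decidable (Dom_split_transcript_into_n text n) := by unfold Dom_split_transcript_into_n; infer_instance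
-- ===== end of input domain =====

-- B replaces A's index-slicing comprehension (+ remainder patch on the last part) by a single
-- destructive take/drop loop that peels n-1 chunks and hands the whole rest to the last part
-- (objective: simpler). A raises ValueError for n ≤ 0; Pre_ excludes exactly those inputs.


-- ===== PORT A =====
def split_transcript_into_n (text : String) (n : Int) : List String :=
  if n < 2 then
    if n = 1 then [text]
    else []  -- Python raises ValueError here; excluded by Pre_
  else
    let sections := (PySem.Str.split? text "\n").getD []  -- sep "\n" ≠ "", so split? is always some
    let total_length : Int := sections.length
    let split_size := PySem.Int.floordiv total_length n
    let parts := (PySem.List.pyRange 0 n 1).map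
      (fun i => PySem.List.slice sections (some (i * split_size)) (some ((i + 1) * split_size)))
    let remaining_sections := PySem.List.slice sections (some (n * split_size)) none
    let parts :=
      if remaining_sections ≠ [] then
        PySem.List.pySetD parts (-1) (PySem.List.pyGetD parts (-1) [] ++ remaining_sections)
      else parts
    parts.map (fun part => PySem.Str.join "\n" part)

-- ===== PORT B =====
def split_transcript_into_n_alt (text : String) (n : Int) : List String :=
  if n < 2 then
    if n = 1 then [text]
    else []  -- Python raises ValueError here; excluded by Pre_
  else
    let sections := (PySem.Str.split? text "\n").getD []  -- sep "\n" ≠ "", so split? is always some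
    let split_size := PySem.Int.floordiv (sections.length : Int) n
    let st := (PySem.List.pyRange 0 (n - 1) 1).foldl
      (fun (st : List String × List String) _ =>
        (st.1 ++ [PySem.Str.join "\n" (PySem.List.slice st.2 none (some split_size))],
         PySem.List.slice st.2 (some split_size) none))
      ([], sections)
    st.1 ++ [PySem.Str.join "\n" st.2]

-- ===== PRECONDITION & SPEC =====
-- A raises ValueError exactly when n ≤ 0; those inputs (and only those) are excluded.
def Pre_split_transcript_into_n (text : String) (n : Int) : Prop := 1 ≤ n
instance (text : String) (n : Int) : Decidable (Pre_split_transcript_into_n text n) := by unfold Pre_split_transcript_into_n; infer_instance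
def pvWitness_split_transcript_into_n : String × Int := ("a\nb\nc", 2)

def Spec_split_transcript_into_n (text : String) (n : Int) (out : List String) : Prop := out = split_transcript_into_n_alt text n
instance (text : String) (n : Int) (out : List String) : Decidable (Spec_split_transcript_into_n text n out) := by unfold Spec_split_transcript_into_n; infer_instance

-- ===== CLAIM (what is proved, stated in full; the proofs are below) =====
def Claim_equal_split_transcript_into_n : Prop := ∀ (text : String) (n : Int), Dom_split_transcript_into_n text n → Pre_split_transcript_into_n text n → Spec_split_transcript_into_n text n (split_transcript_into_n text n)

-- ===== LEMMAS AND PROOFS =====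

-- writing back at index -1 on a list with an exhibited last element
theorem pySetD_append_singleton_neg_one {α : Type} (xs : List α) (x v : α) :
    PySem.List.pySetD (xs ++ [x]) (-1) v = xs ++ [v] := by
  simp [PySem.List.pySetD, PySem.List.pySet?, PySem.List.pyIdx?]

-- a chunk followed by the rest re-assembles the tail
theorem take_drop_reassemble {α : Type} (L : List α) (m s : Nat) :
    (L.drop m).take s ++ L.drop (m + s) = L.drop m := by
  conv_rhs => rw [← List.take_append_drop s (L.drop m)]
  rw [List.drop_drop, Nat.add_comm]

-- B's loop, characterised: after k steps the emitted parts are the first k chunks and the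
-- carried list is L with k·s elements dropped.
theorem alt_loop_spec (s : Nat) (J : List String → String) :
    ∀ (k : Nat) (L acc : List String),
    (List.range k).foldl
      (fun (st : List String × List String) (_ : Nat) =>
        (st.1 ++ [J (st.2.take s)], st.2.drop s)) (acc, L)
    = (acc ++ (List.range k).map (fun i => J ((L.drop (i * s)).take s)), L.drop (k * s)) := by
  intro k
  induction k with
  | zero => intro L acc; simp
  | succ k ih =>
    intro L acc
    rw [List.range_succ, List.foldl_append, ih]
    simp [List.drop_drop, Nat.succ_mul, Nat.add_comm]

-- A's chunking (with the remainder patched onto the last part) equals the take/drop chunking,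
-- stated over the already-split line list L.
theorem core_eq (L : List String) (N : Nat) (hN : 2 ≤ N) :
    (let s : Nat := L.length / N
     let parts := (List.range N).map (fun i => (L.drop (i * s)).take s)
     let rem := L.drop (N * s)
     let parts := if rem ≠ [] then
         PySem.List.pySetD parts (-1) (PySem.List.pyGetD parts (-1) [] ++ rem) else parts
     parts.map (fun p => PySem.Str.join "\n" p))
    = (List.range (N - 1)).map (fun i => PySem.Str.join "\n" ((L.drop (i * (L.length / N))).take (L.length / N)))
      ++ [PySem.Str.join "\n" (L.drop ((N - 1) * (L.length / N)))] := by
  set s := L.length / N with hs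
  have hNsplit : N = (N - 1) + 1 := by omega
  have hrange : List.range N = List.range (N - 1) ++ [N - 1] := by
    conv_lhs => rw [hNsplit, List.range_succ]
  have hmul : (N - 1) * s + s = N * s := by
    have h1 : s ≤ N * s := Nat.le_mul_of_pos_left s (by omega)
    rw [Nat.sub_one_mul]; omega
  have hlast : (L.drop ((N - 1) * s)).take s ++ L.drop (N * s) = L.drop ((N - 1) * s) := by
    rw [← hmul, take_drop_reassemble]
  simp only []
  rw [hrange, List.map_append, List.map_singleton]
  by_cases hrem : L.drop (N * s) = []
  · rw [if_neg (by simp [hrem])]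
    have hc : (L.drop ((N - 1) * s)).take s = L.drop ((N - 1) * s) := by
      conv_rhs => rw [← hlast, hrem]
      rw [List.append_nil]
    rw [List.map_append, List.map_singleton, hc]
    simp [List.map_map, Function.comp]
  · rw [if_pos (by simpa using hrem)]
    rw [PySem.List.pyGetD_neg_one_append_singleton,
        pySetD_append_singleton_neg_one, List.map_append, List.map_singleton, hlast]
    simp [List.map_map, Function.comp]

-- the two ports agree on every n ≥ 1
theorem ports_agree : ∀ (text : String) (n : Int), 1 ≤ n →
    split_transcript_into_n text n = split_transcript_into_n_alt text n := by
  intro text n hpre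
  by_cases h2 : n < 2
  · have h1 : n = 1 := by omega
    simp [split_transcript_into_n, split_transcript_into_n_alt, h1]
  · obtain ⟨N, rfl⟩ : ∃ N : Nat, n = (N : Int) := ⟨n.toNat, by omega⟩
    have hN : 2 ≤ N := by exact_mod_cast not_lt.mp h2
    set L := (PySem.Str.split? text "\n").getD [] with hL
    set s := L.length / N with hs
    rw [split_transcript_into_n, split_transcript_into_n_alt, if_neg h2, if_neg h2]
    simp only [← hL]
    have hfd : PySem.Int.floordiv (L.length : Int) (N : Int) = (s : Int) :=
      PySem.Int.floordiv_natCast L.length N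
    rw [hfd]
    have hN1 : (N : Int) - 1 = ((N - 1 : Nat) : Int) := by omega
    rw [hN1, PySem.List.pyRange_zero_natCast, PySem.List.pyRange_zero_natCast, List.map_map,
        List.foldl_map]
    have hAmap : ∀ i : Nat,
        PySem.List.slice L (some ((i : Int) * (s : Int))) (some (((i : Int) + 1) * (s : Int)))
        = (L.drop (i * s)).take s := by
      intro i
      have e1 : (i : Int) * (s : Int) = ((i * s : Nat) : Int) := by push_cast; ring
      have e2 : ((i : Int) + 1) * (s : Int) = ((i * s : Nat) : Int) + ((s : Nat) : Int) := by
        push_cast; ring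
      rw [e1, e2, PySem.List.slice_natCast_add]
    have hrem : PySem.List.slice L (some ((N : Int) * (s : Int))) none = L.drop (N * s) := by
      have e : (N : Int) * (s : Int) = ((N * s : Nat) : Int) := by push_cast; ring
      rw [e, PySem.List.slice_from_natCast]
    rw [hrem]
    have hB1 : ∀ xs : List String, PySem.List.slice xs none (some (s : Int)) = xs.take s :=
      fun xs => PySem.List.slice_to_natCast xs s
    have hB2 : ∀ xs : List String, PySem.List.slice xs (some (s : Int)) none = xs.drop s :=
      fun xs => PySem.List.slice_from_natCast xs s
    simp only [Function.comp_def, hAmap, hB1, hB2]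
    rw [alt_loop_spec s (PySem.Str.join "\n") (N - 1) L []]
    simpa using core_eq L N hN

-- ===== VERDICT (by name: the statement is the Claim_ definition above) =====
theorem split_transcript_into_n_spec : Claim_equal_split_transcript_into_n := by
  intro text n _ hpre
  exact ports_agree text n hpre
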